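-- pv_equiv track=rewrite | github.com/OtteSimon/Data_Extraction_NLP | src/datasheet_extraction/processing/entity_postprocessing.py | consolidate_document_pairs
-- ===== SOURCE A (Python) =====
-- def consolidate_document_pairs(rows):
--     consolidated_rows = {}
--
--     for row in rows:
--         base_filename = row["Filename"].lower()
--         base_filename = base_filename.replace("_mds", "")
--         base_filename = base_filename.replace("_mdb", "")
--
--         if base_filename not in consolidated_rows:
--             consolidated_rows[base_filename] = row.copy()
--             continue
--
--         for key, value in row.items():
--             if key != "Filename" and value and consolidated_rows[base_filename][key] == "":
--                 consolidated_rows[base_filename][key] = value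
--
--     return list(consolidated_rows.values())
-- ===== SOURCE B (Python) =====
-- def consolidate_document_pairs(rows):
--     # Group rows by base filename (first-seen order), then build each merged
--     # record key-majorly from the group's first row.
--     groups = {}
--     for row in rows:
--         base = row["Filename"].lower().replace("_mds", "").replace("_mdb", "")
--         groups.setdefault(base, []).append(row)
--     out = []
--     for first, *rest in groups.values():
--         out.append({
--             k: v if v or k == "Filename" else next((r[k] for r in rest if r.get(k)), "")
--             for k, v in first.items()
--         })
--     return out
-- ===== Notes on version B (the rewrite author's own statement) =====
-- stated objective: alternative
-- what changed: B first groups the rows into a dict keyed by base filename and then builds each consolidated record key-by-key from the group's first row (taking the first non-empty later value per still-empty key), instead of A's single pass that mutates the accumulated record row-by-row in place.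
import Mathlib
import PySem

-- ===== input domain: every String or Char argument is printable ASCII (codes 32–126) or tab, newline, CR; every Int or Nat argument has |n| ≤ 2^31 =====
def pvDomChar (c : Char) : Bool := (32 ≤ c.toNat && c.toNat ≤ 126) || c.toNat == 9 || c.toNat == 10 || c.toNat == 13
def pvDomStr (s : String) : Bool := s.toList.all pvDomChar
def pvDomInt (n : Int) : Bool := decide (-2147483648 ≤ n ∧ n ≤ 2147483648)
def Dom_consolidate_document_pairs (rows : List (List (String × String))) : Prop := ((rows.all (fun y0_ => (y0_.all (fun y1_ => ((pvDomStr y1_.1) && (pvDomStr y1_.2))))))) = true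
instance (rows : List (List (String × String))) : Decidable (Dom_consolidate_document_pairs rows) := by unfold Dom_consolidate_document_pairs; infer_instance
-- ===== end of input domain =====

-- B groups the rows by base filename first and then builds each merged record key-by-key
-- from the group's first row (a different decomposition of the same task; same cost).

-- shared helper: base filename of a row = row["Filename"].lower() with "_mds"/"_mdb" removed
-- (KeyError on a missing "Filename" replaced by getD ""; Pre_ excludes those inputs)
def pvBase (row : PySem.Dict String String) : String :=
  PySem.Str.replace (PySem.Str.replace (PySem.Str.lower (row.getD "Filename" "")) "_mds" "") "_mdb" ""

-- ===== PORT A =====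
-- inner loop body: for key, value in row.items():
--   if key != "Filename" and value and d[b][key] == "": d[b][key] = value
-- (Python's KeyError on d[b][key] for a missing key is replaced by getD ""; Pre_ excludes
-- exactly the inputs where that lookup would raise)
def pvMergeStepA (b : String) (d : PySem.Dict String (PySem.Dict String String))
    (kv : String × String) : PySem.Dict String (PySem.Dict String String) :=
  if kv.1 ≠ "Filename" ∧ kv.2 ≠ "" ∧ (d.getD b PySem.Dict.empty).getD kv.1 "" = "" then
    d.insert b ((d.getD b PySem.Dict.empty).insert kv.1 kv.2)
  else d

def pvStepA (d : PySem.Dict String (PySem.Dict String String))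
    (row : PySem.Dict String String) : PySem.Dict String (PySem.Dict String String) :=
  let b := pvBase row
  if d.contains b then row.items.foldl (pvMergeStepA b) d
  else d.insert b row

def consolidate_document_pairs (rows : List (List (String × String))) : List (List (String × String)) :=
  (((rows.map PySem.Dict.ofList).foldl pvStepA PySem.Dict.empty).values).map PySem.Dict.items

-- ===== PORT B =====
-- next((r[k] for r in rest if r.get(k)), "")
def pvPick (k : String) (rest : List (PySem.Dict String String)) : String :=
  match rest.find? (fun r => r.getD k "" != "") with
  | some r => r.getD k ""
  | none => ""

-- {k: v if v or k == "Filename" else next(...) for k, v in first.items()}  (grp is never [])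
def pvMergeB (grp : List (PySem.Dict String String)) : List (String × String) :=
  match grp with
  | [] => []
  | first :: rest =>
      first.items.map (fun kv => (kv.1, if kv.2 ≠ "" ∨ kv.1 = "Filename" then kv.2 else pvPick kv.1 rest))

-- groups.setdefault(base, []).append(row)
def pvGroupStep (g : PySem.Dict String (List (PySem.Dict String String)))
    (row : PySem.Dict String String) : PySem.Dict String (List (PySem.Dict String String)) :=
  g.modify (pvBase row) [] (· ++ [row])

def consolidate_document_pairs_alt (rows : List (List (String × String))) : List (List (String × String)) :=
  (((rows.map PySem.Dict.ofList).foldl pvGroupStep PySem.Dict.empty).values).map pvMergeB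

-- ===== PRECONDITION & SPEC =====
-- Pre_ excludes exactly the inputs on which the Python A raises KeyError: a row without a
-- "Filename" key, or a later row of a group carrying a non-"Filename" key with a non-empty
-- value that the group's first row lacks.
def Pre_consolidate_document_pairs (rows : List (List (String × String))) : Prop :=
  (∀ d ∈ rows.map PySem.Dict.ofList, d.contains "Filename" = true) ∧
  (∀ b ∈ (rows.map PySem.Dict.ofList).map pvBase,
    ∀ r ∈ ((rows.map PySem.Dict.ofList).filter (fun d => pvBase d == b)).tail,
      ∀ kv ∈ r.items, kv.1 ≠ "Filename" → kv.2 ≠ "" →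
        ((((rows.map PySem.Dict.ofList).filter (fun d => pvBase d == b)).head?.getD
            PySem.Dict.empty).contains kv.1) = true)
instance (rows : List (List (String × String))) : Decidable (Pre_consolidate_document_pairs rows) := by
  unfold Pre_consolidate_document_pairs; infer_instance

def pvWitness_consolidate_document_pairs : (List (List (String × String))) :=
  [[("Filename", "a"), ("k", "")]]

def Spec_consolidate_document_pairs (rows : List (List (String × String))) (out : List (List (String × String))) : Prop := out = consolidate_document_pairs_alt rows
instance (rows : List (List (String × String))) (out : List (List (String × String))) : Decidable (Spec_consolidate_document_pairs rows out) := by unfold Spec_consolidate_document_pairs; infer_instance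

-- ===== CLAIM (what is proved, stated in full; the proofs are below) =====
def Claim_equal_consolidate_document_pairs : Prop := ∀ (rows : List (List (String × String))), Dom_consolidate_document_pairs rows → Pre_consolidate_document_pairs rows → Spec_consolidate_document_pairs rows (consolidate_document_pairs rows)

-- ===== LEMMAS AND PROOFS =====

-- A's inner per-key update, abstracted to the group's accumulated record
def pvInnerStep (acc : PySem.Dict String String) (kv : String × String) : PySem.Dict String String :=
  if kv.1 ≠ "Filename" ∧ kv.2 ≠ "" ∧ acc.getD kv.1 "" = "" then acc.insert kv.1 kv.2 else acc

-- A's per-group result: the later rows folded into the group's first row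
def pvMergeG (grp : List (PySem.Dict String String)) : PySem.Dict String String :=
  match grp with
  | [] => PySem.Dict.empty
  | f :: rest => rest.foldl (fun acc r => r.items.foldl pvInnerStep acc) f

-- closed form of A's outer dict
def pvAChar (ds : List (PySem.Dict String String)) : PySem.Dict String (PySem.Dict String String) :=
  PySem.Dict.mk ((PySem.Set.ofList (ds.map pvBase)).map
    (fun b => (b, pvMergeG (ds.filter (fun r => pvBase r == b)))))

-- closed form of B's groups dict
def pvBChar (ds : List (PySem.Dict String String)) : PySem.Dict String (List (PySem.Dict String String)) :=
  PySem.Dict.mk ((PySem.Set.ofList (ds.map pvBase)).map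
    (fun b => (b, ds.filter (fun r => pvBase r == b))))

-- folding one row's items into an accumulated record rewrites each present value
theorem pv_onerow (l : List (String × String)) : ∀ (f : PySem.Dict String String),
    f.keys.Nodup → (l.map Prod.fst).Nodup →
    (∀ kv ∈ l, kv.1 ≠ "Filename" → kv.2 ≠ "" → f.contains kv.1 = true) →
    (l.foldl pvInnerStep f).items =
      f.items.map (fun kv => (kv.1, if kv.2 ≠ "" ∨ kv.1 = "Filename" then kv.2
        else (PySem.Dict.mk l).getD kv.1 "")) := by
  induction l with
  | nil =>
    intro f hf _ _
    simp only [List.foldl_nil]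
    rw [List.map_congr_left (g := id), List.map_id]
    rintro ⟨k, v⟩ hkv
    by_cases hv : v ≠ "" ∨ k = "Filename"
    · simp [hv]
    · push Not at hv
      simp [hv.1, hv.2, PySem.Dict.getD, PySem.Dict.get?]
  | cons p tl ih =>
    rintro f hf hnd hsub
    obtain ⟨k0, w⟩ := p
    simp only [List.foldl_cons]
    have hndtl : (tl.map Prod.fst).Nodup := (List.nodup_cons.mp hnd).2
    have hk0tl : k0 ∉ tl.map Prod.fst := (List.nodup_cons.mp hnd).1
    by_cases hc : k0 ≠ "Filename" ∧ w ≠ "" ∧ f.getD k0 "" = ""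
    · have hcont : f.contains k0 = true := hsub (k0, w) (by simp) hc.1 hc.2.1
      have hkeys : (f.insert k0 w).keys = f.keys := PySem.Dict.keys_insert_of_contains f w hcont
      have hstep : pvInnerStep f (k0, w) = f.insert k0 w := by simp [pvInnerStep, hc]
      rw [hstep, ih (f.insert k0 w) (hkeys ▸ hf) hndtl
        (fun kv hkv h1 h2 => by
          rw [PySem.Dict.contains_insert]
          simp [hsub kv (by simp [hkv]) h1 h2]),
        PySem.Dict.items_insert_of_contains f w hcont, List.map_map]
      apply List.map_congr_left
      rintro ⟨k, v⟩ hkv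
      by_cases hk : k = k0
      · subst hk
        have hv : v = "" := by
          have h := PySem.Dict.getD_of_mem_items f hkv hf ""
          rw [hc.2.2] at h; exact h.symm
        subst hv
        simp [Function.comp, hc.1, hc.2.1, PySem.Dict.getD_eq_get?_getD, PySem.Dict.get?_mk_cons]
      · simp only [Function.comp_apply]
        have hbk : (k == k0) = false := by simp [hk]
        simp only [hbk]
        by_cases hv : v ≠ "" ∨ k = "Filename"
        · simp [hv]
        · push Not at hv
          simp only [hv.1, hv.2]
          simp [hv.2, PySem.Dict.getD_eq_get?_getD, PySem.Dict.get?_mk_cons,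
            show (k0 == k) = false by simp [Ne.symm hk]]
    · have hstep : pvInnerStep f (k0, w) = f := by simp [pvInnerStep, hc]
      rw [hstep, ih f hf hndtl (fun kv hkv h1 h2 => hsub kv (by simp [hkv]) h1 h2)]
      apply List.map_congr_left
      rintro ⟨k, v⟩ hkv
      by_cases hv : v ≠ "" ∨ k = "Filename"
      · simp [hv]
      · push Not at hv
        simp only [hv.1, hv.2]
        by_cases hk : k = k0
        · subst hk
          have hveq : f.getD k "" = v := PySem.Dict.getD_of_mem_items f hkv hf ""
          have hw : w = "" := by
            by_contra hw
            exact hc ⟨hv.2, hw, by rw [hveq, hv.1]⟩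
          subst hw
          have htl : ({ items := tl } : PySem.Dict String String).get? k = none :=
            (PySem.Dict.get?_eq_none_iff_not_mem_keys _ _).mpr (by rw [PySem.Dict.keys_mk]; exact hk0tl)
          simp [PySem.Dict.getD_eq_get?_getD, PySem.Dict.get?_mk_cons, htl]
        · simp [PySem.Dict.getD_eq_get?_getD, PySem.Dict.get?_mk_cons,
            show (k0 == k) = false by simp [Ne.symm hk]]

-- A's per-group fold equals B's key-major record
theorem pv_grouprow (rest : List (PySem.Dict String String)) : ∀ (f : PySem.Dict String String),
    f.keys.Nodup → (∀ r ∈ rest, r.keys.Nodup) →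
    (∀ r ∈ rest, ∀ kv ∈ r.items, kv.1 ≠ "Filename" → kv.2 ≠ "" → f.contains kv.1 = true) →
    (rest.foldl (fun acc r => r.items.foldl pvInnerStep acc) f).items =
      f.items.map (fun kv => (kv.1, if kv.2 ≠ "" ∨ kv.1 = "Filename" then kv.2
        else pvPick kv.1 rest)) := by
  induction rest with
  | nil =>
    intro f hf _ _
    simp only [List.foldl_nil]
    rw [List.map_congr_left (g := id), List.map_id]
    rintro ⟨k, v⟩ hkv
    by_cases hv : v ≠ "" ∨ k = "Filename"
    · simp [hv]
    · push Not at hv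
      simp [hv.1, hv.2, pvPick]
  | cons r rest' ih =>
    intro f hf hndr hsub
    simp only [List.foldl_cons]
    have hr : r.keys.Nodup := hndr r (by simp)
    have h1 := pv_onerow r.items f hf hr (hsub r (by simp))
    have hkeys : (r.items.foldl pvInnerStep f).keys = f.keys := by
      simp only [PySem.Dict.keys, h1, List.map_map]
      rfl
    rw [ih _ (hkeys ▸ hf) (fun r' hr' => hndr r' (by simp [hr']))
        (fun r' hr' kv hkv h1' h2' => by
          rw [PySem.Dict.contains_iff_mem_keys] at *
          rw [hkeys]
          exact (PySem.Dict.contains_iff_mem_keys f kv.1).mp (hsub r' (by simp [hr']) kv hkv h1' h2')),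
      h1, List.map_map]
    apply List.map_congr_left
    rintro ⟨k, v⟩ hkv
    by_cases hv : v ≠ "" ∨ k = "Filename"
    · simp [hv]
    · push Not at hv
      simp only [Function.comp_apply, hv.1, hv.2]
      by_cases hw : r.getD k "" ≠ ""
      · have hp : pvPick k (r :: rest') = r.getD k "" := by
          simp [pvPick, List.find?_cons_of_pos, hw]
        simp [hw, hp]
      · push Not at hw
        have hp : pvPick k (r :: rest') = pvPick k rest' := by
          simp [pvPick, List.find?_cons_of_neg, hw]
        simp [hw, hp]

theorem pv_insert_getD_self_of_contains (d : PySem.Dict String (PySem.Dict String String)) (b : String)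
    (hnd : d.keys.Nodup) (hc : d.contains b = true) :
    d.insert b (d.getD b PySem.Dict.empty) = d := by
  apply PySem.Dict.ext
  rw [PySem.Dict.items_insert_of_contains d _ hc]
  rw [List.map_congr_left (g := id), List.map_id]
  rintro ⟨k, v⟩ hkv
  by_cases hk : k = b
  · subst hk
    have := PySem.Dict.getD_of_mem_items d hkv hnd PySem.Dict.empty
    simp [this]
  · simp [show (k == b) = false by simp [hk]]

-- A's inner loop only rewrites the entry at key b
theorem pv_nest (b : String) (l : List (String × String)) : ∀ (d : PySem.Dict String (PySem.Dict String String)),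
    d.keys.Nodup → d.contains b = true →
    l.foldl (pvMergeStepA b) d = d.insert b (l.foldl pvInnerStep (d.getD b PySem.Dict.empty)) := by
  induction l with
  | nil => intro d hnd hc; simp only [List.foldl_nil]; exact (pv_insert_getD_self_of_contains d b hnd hc).symm
  | cons p l ih =>
    rintro d hnd hc
    obtain ⟨k, w⟩ := p
    simp only [List.foldl_cons]
    by_cases hcond : k ≠ "Filename" ∧ w ≠ "" ∧ (d.getD b PySem.Dict.empty).getD k "" = ""
    · have hstep : pvMergeStepA b d (k, w) = d.insert b ((d.getD b PySem.Dict.empty).insert k w) := by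
        simp [pvMergeStepA, hcond]
      have hstep' : pvInnerStep (d.getD b PySem.Dict.empty) (k, w) = (d.getD b PySem.Dict.empty).insert k w := by
        simp [pvInnerStep, hcond]
      rw [hstep, hstep',
        ih (d.insert b ((d.getD b PySem.Dict.empty).insert k w))
          ((PySem.Dict.keys_insert_of_contains d _ hc) ▸ hnd)
          (by rw [PySem.Dict.contains_insert]; simp),
        PySem.Dict.getD_insert_self, PySem.Dict.insert_insert_self]
    · have hstep : pvMergeStepA b d (k, w) = d := by simp [pvMergeStepA, hcond]
      have hstep' : pvInnerStep (d.getD b PySem.Dict.empty) (k, w) = d.getD b PySem.Dict.empty := by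
        simp only [pvInnerStep, if_neg hcond]
      rw [hstep, hstep', ih d hnd hc]

theorem pv_keys_AChar (ds : List (PySem.Dict String String)) :
    (pvAChar ds).keys = PySem.Set.ofList (ds.map pvBase) := by
  simp [pvAChar, PySem.Dict.keys, List.map_map, Function.comp_def]

theorem pv_nodup_keys_AChar (ds : List (PySem.Dict String String)) : (pvAChar ds).keys.Nodup := by
  rw [pv_keys_AChar]; exact PySem.Set.nodup_ofList _

theorem pv_mergeG_append_singleton (g : List (PySem.Dict String String)) (r : PySem.Dict String String)
    (hg : g ≠ []) : pvMergeG (g ++ [r]) = r.items.foldl pvInnerStep (pvMergeG g) := by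
  cases g with
  | nil => exact absurd rfl hg
  | cons f rest => simp [pvMergeG, List.foldl_append]

theorem pv_getD_AChar (ds : List (PySem.Dict String String)) (b : String) (hb : b ∈ PySem.Set.ofList (ds.map pvBase)) :
    (pvAChar ds).getD b PySem.Dict.empty = pvMergeG (ds.filter (fun r => pvBase r == b)) := by
  apply PySem.Dict.getD_of_mem_items (d := pvAChar ds) _ (pv_nodup_keys_AChar ds)
  show _ ∈ (pvAChar ds).items
  simp only [pvAChar]
  exact List.mem_map_of_mem hb

-- closed form of A's whole outer loop
theorem pv_A_char (ds : List (PySem.Dict String String)) :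
    ds.foldl pvStepA PySem.Dict.empty = pvAChar ds := by
  induction ds using List.reverseRecOn with
  | nil => rfl
  | append_singleton ds r ih =>
    rw [List.foldl_append, List.foldl_cons, List.foldl_nil, ih]
    have hfilter_new : ∀ b', (ds ++ [r]).filter (fun x => pvBase x == b') =
        ds.filter (fun x => pvBase x == b') ++ if pvBase r == b' then [r] else [] := by
      intro b'; rw [List.filter_append]; cases h : pvBase r == b' <;> simp [List.filter, h]
    have hcontains : (pvAChar ds).contains (pvBase r) = decide (pvBase r ∈ PySem.Set.ofList (ds.map pvBase)) := by
      rw [PySem.Dict.contains_eq_decide_mem_keys, pv_keys_AChar]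
    by_cases hb : pvBase r ∈ PySem.Set.ofList (ds.map pvBase)
    · -- existing group
      have hc : (pvAChar ds).contains (pvBase r) = true := by rw [hcontains]; simp [hb]
      have hgne : ds.filter (fun x => pvBase x == pvBase r) ≠ [] := by
        rw [PySem.Set.mem_ofList] at hb
        obtain ⟨x, hx, hbx⟩ := List.mem_map.mp hb
        intro hnil
        have : x ∈ ds.filter (fun x => pvBase x == pvBase r) := List.mem_filter.mpr ⟨hx, by simp [hbx]⟩
        simp [hnil] at this
      rw [show pvStepA (pvAChar ds) r = r.items.foldl (pvMergeStepA (pvBase r)) (pvAChar ds) by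
        simp [pvStepA, hc]]
      rw [pv_nest _ _ _ (pv_nodup_keys_AChar ds) hc, pv_getD_AChar ds _ hb]
      apply PySem.Dict.ext
      rw [PySem.Dict.items_insert_of_contains _ _ hc]
      simp only [pvAChar, List.map_map]
      have hset : PySem.Set.ofList ((ds ++ [r]).map pvBase) = PySem.Set.ofList (ds.map pvBase) := by
        rw [List.map_append, PySem.Set.ofList_append]
        simp [PySem.Set.update, PySem.Set.add, PySem.Set.contains, hb]
      rw [hset]
      apply List.map_congr_left
      intro b' hb'
      by_cases hbb : b' = pvBase r
      · subst hbb
        simp only [Function.comp_apply, BEq.rfl, if_true]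
        have ht : (pvBase r == pvBase r) = true := by simp
        rw [hfilter_new, ht]
        simp only [if_true]
        rw [pv_mergeG_append_singleton _ _ hgne]
      · have hne : (b' == pvBase r) = false := by simp [hbb]
        have hf : (pvBase r == b') = false := by simp [Ne.symm hbb]
        simp only [Function.comp_apply, hne]
        rw [hfilter_new, hf]
        simp
    · -- new group
      have hc : (pvAChar ds).contains (pvBase r) = false := by rw [hcontains]; simp [hb]
      rw [show pvStepA (pvAChar ds) r = (pvAChar ds).insert (pvBase r) r by simp [pvStepA, hc]]
      apply PySem.Dict.ext
      rw [PySem.Dict.items_insert_of_not_contains _ _ hc]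
      simp only [pvAChar]
      have hset : PySem.Set.ofList ((ds ++ [r]).map pvBase) = PySem.Set.ofList (ds.map pvBase) ++ [pvBase r] := by
        rw [List.map_append, PySem.Set.ofList_append]
        simp [PySem.Set.update, PySem.Set.add, PySem.Set.contains, hb]
      rw [hset, List.map_append]
      congr 1
      · apply List.map_congr_left
        intro b' hb'
        have hbb : b' ≠ pvBase r := fun h => hb (h ▸ hb')
        have hf : (pvBase r == b') = false := by simp [Ne.symm hbb]
        rw [hfilter_new, hf]
        simp
      · have hfe : ds.filter (fun x => pvBase x == pvBase r) = [] := by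
          rw [List.filter_eq_nil_iff]
          intro x hx hbx
          exact hb (PySem.Set.mem_ofList _ _ |>.mpr (List.mem_map.mpr ⟨x, hx, by simpa using hbx⟩))
        simp only [List.map_cons, List.map_nil]
        have ht : (pvBase r == pvBase r) = true := by simp
        rw [hfilter_new, hfe, ht]
        simp [pvMergeG]

-- closed form of B's grouping loop
theorem pv_B_char (ds : List (PySem.Dict String String)) :
    ds.foldl pvGroupStep PySem.Dict.empty = pvBChar ds := by
  have hfold : ds.foldl pvGroupStep PySem.Dict.empty =
      (ds.map (fun r => (pvBase r, r))).foldl (fun d p => d.modify p.1 [] (· ++ [p.2])) PySem.Dict.empty := by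
    rw [List.foldl_map]
    rfl
  have hkeys : (ds.foldl pvGroupStep PySem.Dict.empty).keys = PySem.Set.ofList (ds.map pvBase) := by
    have := PySem.Dict.keys_foldl_modify_key ds pvBase ([] : List (PySem.Dict String String))
      (fun _ r v => v ++ [r]) PySem.Dict.empty
    simpa [pvGroupStep] using this
  have hnd : (ds.foldl pvGroupStep PySem.Dict.empty).keys.Nodup := by
    rw [hkeys]; exact PySem.Set.nodup_ofList _
  apply PySem.Dict.ext
  rw [PySem.Dict.items_eq_map_keys _ hnd [], hkeys]
  show _ = (pvBChar ds).items
  simp only [pvBChar]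
  apply List.map_congr_left
  intro b hb
  have hg : (ds.foldl pvGroupStep PySem.Dict.empty).getD b [] = ds.filter (fun r => pvBase r == b) := by
    rw [hfold, PySem.Dict.getD_foldl_modify_append]
    simp [List.filter_map, Function.comp_def]
  rw [hg]

-- ===== VERDICT (by name: the statement is the Claim_ definition above) =====
theorem consolidate_document_pairs_spec : Claim_equal_consolidate_document_pairs := by
  intro rows _ hpre
  unfold Spec_consolidate_document_pairs consolidate_document_pairs consolidate_document_pairs_alt
  set ds := rows.map PySem.Dict.ofList with hds
  rw [pv_A_char, pv_B_char]
  simp only [pvAChar, pvBChar, PySem.Dict.values_mk, List.map_map]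
  apply List.map_congr_left
  intro b hb
  simp only [Function.comp_apply]
  have hmem : ∀ r ∈ ds.filter (fun r => pvBase r == b), r.keys.Nodup := by
    intro r hr
    have : r ∈ ds := (List.mem_filter.mp hr).1
    obtain ⟨row, _, hrow⟩ := List.mem_map.mp this
    exact hrow ▸ PySem.Dict.nodup_keys_ofList row
  have hbmem : b ∈ ds.map pvBase := (PySem.Set.mem_ofList _ _).mp hb
  cases hgrp : ds.filter (fun r => pvBase r == b) with
  | nil =>
    exfalso
    obtain ⟨x, hx, hbx⟩ := List.mem_map.mp hbmem
    have : x ∈ ds.filter (fun r => pvBase r == b) := List.mem_filter.mpr ⟨hx, by simp [hbx]⟩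
    simp [hgrp] at this
  | cons f rest =>
    have hpre2 := hpre.2 b hbmem
    rw [← hds, hgrp] at hpre2
    simp only [List.tail_cons, List.head?_cons, Option.getD_some] at hpre2
    have hfnd : f.keys.Nodup := hmem f (by rw [hgrp]; simp)
    have hrnd : ∀ r ∈ rest, r.keys.Nodup := fun r hr => hmem r (by rw [hgrp]; simp [hr])
    show (pvMergeG (f :: rest)).items = pvMergeB (f :: rest)
    simp only [pvMergeG, pvMergeB]
    exact pv_grouprow rest f hfnd hrnd hpre2
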